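-- pv_equiv track=rewrite | github.com/y1ny/WordDeletion | utils.py | minDeletionops
-- ===== SOURCE A (Python) =====
-- import copy
--
-- def minDeletionops(A, B):
--     # A: original sequence
--     # B: prediction sequence
--     res = 0
--     opera_lst = []
--     a_idx = 0
--     b_idx = 0
--
--     while a_idx < len(A):
--         if b_idx >= len(B):
--             opera_lst.append([a_idx, A[a_idx]])
--             a_idx += 1
--             res += 1
--             continue
--         if A[a_idx] == B[b_idx]:
--             a_idx += 1
--             b_idx += 1
--         else:
--             opera_lst.append([a_idx, A[a_idx]])
--             a_idx += 1
--             res += 1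
--     # this part we check whether the ops are correct
--     tmp_B = copy.deepcopy(B)
--     for op in opera_lst:
--         tmp_B.insert(op[0], op[1])
--     if tmp_B != A:
--         return -1, []
--     return res, opera_lst
-- ===== SOURCE B (Python) =====
-- def minDeletionops(A, B):
--     # Stage 1: leftmost embedding of B into A via repeated A.index(y, pos);
--     # fails (ValueError) exactly when B is not a subsequence of A.
--     matched = []
--     pos = 0
--     for y in B:
--         try:
--             pos = A.index(y, pos)
--         except ValueError:
--             return -1, []
--         matched.append(pos)
--         pos += 1
--     # Stage 2: the deletion ops are the positions of A the embedding left unused.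
--     used = set(matched)
--     ops = [[i, x] for i, x in enumerate(A) if i not in used]
--     return len(ops), ops
-- ===== Notes on version B (the rewrite author's own statement) =====
-- stated objective: faster
-- what changed: B computes the leftmost embedding of B into A in a first stage (repeated A.index from an offset), then emits the ops as the complement of the used positions in a second comprehension pass; the quadratic rebuild-by-repeated-insert verification is gone and success is simply 'the embedding exists'.
import Mathlib
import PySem

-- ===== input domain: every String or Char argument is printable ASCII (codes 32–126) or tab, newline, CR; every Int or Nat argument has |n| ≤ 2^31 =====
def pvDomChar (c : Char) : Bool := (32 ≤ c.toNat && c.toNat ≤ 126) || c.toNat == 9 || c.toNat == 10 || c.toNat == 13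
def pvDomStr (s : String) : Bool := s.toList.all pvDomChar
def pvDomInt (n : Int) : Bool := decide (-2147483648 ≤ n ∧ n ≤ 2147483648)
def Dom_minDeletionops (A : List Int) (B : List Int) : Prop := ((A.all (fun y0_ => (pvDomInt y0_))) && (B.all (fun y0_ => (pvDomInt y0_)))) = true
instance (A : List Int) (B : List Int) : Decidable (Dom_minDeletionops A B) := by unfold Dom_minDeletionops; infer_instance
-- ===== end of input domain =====

-- B stages the work differently: first the leftmost embedding of B into A (repeated index-from-offset),
-- then the ops as the complement of the used positions; A's quadratic rebuild-by-insert verification is gone.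

-- ===== PORT A =====
-- the while-loop: a_idx/b_idx counters, res and opera_lst accumulators
def minDelLoopA (A B : List Int) (a b : Nat) (res : Int) (ops : List (List Int)) :
    Int × List (List Int) :=
  if _h : a < A.length then
    let x := A.getD a 0          -- A[a_idx], always in range here
    if B.length ≤ b then
      minDelLoopA A B (a + 1) b (res + 1) (ops ++ [[(a : Int), x]])
    else if x = B.getD b 0 then  -- B[b_idx], in range here
      minDelLoopA A B (a + 1) (b + 1) res ops
    else
      minDelLoopA A B (a + 1) b (res + 1) (ops ++ [[(a : Int), x]])
  else (res, ops)
termination_by A.length - a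

def minDeletionops (A : List Int) (B : List Int) : Int × List (List Int) :=
  let r := minDelLoopA A B 0 0 0 []
  let tmpB := r.2.foldl
    (fun acc op => PySem.List.insert acc ((PySem.List.pyGet? op 0).getD 0)
                                        ((PySem.List.pyGet? op 1).getD 0)) B
  if tmpB ≠ A then (-1, []) else r

-- ===== PORT B =====
-- A.index(y, pos): first index ≥ pos with A[i] = y (none = ValueError)
def indexFrom (A : List Int) (y : Int) (pos : Nat) : Option Nat :=
  if _h : pos < A.length then
    if A.getD pos 0 = y then some pos else indexFrom A y (pos + 1)
  else none
termination_by A.length - pos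

-- the for-loop over B: matched accumulator and pos; none = the early 'return -1, []'
def embedLoop (A : List Int) : List Int → Nat → List Nat → Option (List Nat)
  | [], _, matched => some matched
  | y :: ys, pos, matched =>
    match indexFrom A y pos with
    | none => none
    | some p => embedLoop A ys (p + 1) (matched ++ [p])

-- the comprehension over enumerate(A) with the 'i not in used' membership test
def buildOps (used : PySem.Set Nat) : List Int → Nat → List (List Int)
  | [], _ => []
  | x :: rest, i =>
    if PySem.Set.contains used i then buildOps used rest (i + 1)
    else [(i : Int), x] :: buildOps used rest (i + 1)

def minDeletionops_alt (A : List Int) (B : List Int) : Int × List (List Int) :=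
  match embedLoop A B 0 [] with
  | none => (-1, [])
  | some matched =>
    let ops := buildOps (PySem.Set.ofList matched) A 0
    ((ops.length : Int), ops)

-- ===== PRECONDITION & SPEC =====
def Spec_minDeletionops (A : List Int) (B : List Int) (out : Int × List (List Int)) : Prop := out = minDeletionops_alt A B
instance (A : List Int) (B : List Int) (out : Int × List (List Int)) : Decidable (Spec_minDeletionops A B out) := by unfold Spec_minDeletionops; infer_instance

-- ===== CLAIM (what is proved, stated in full; the proofs are below) =====
def Claim_equal_minDeletionops : Prop := ∀ (A : List Int) (B : List Int), Dom_minDeletionops A B → Spec_minDeletionops A B (minDeletionops A B)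

-- ===== LEMMAS AND PROOFS =====

-- proof-side pure loop for A: (final b_idx, ops emitted from position (a, b) on)
def minDelGo (A B : List Int) (a b : Nat) : Nat × List (List Int) :=
  if h : a < A.length then
    let x := A.getD a 0
    if b < B.length ∧ x = B.getD b 0 then
      minDelGo A B (a + 1) (b + 1)
    else
      let r := minDelGo A B (a + 1) b
      (r.1, [(a : Int), x] :: r.2)
  else (b, [])
termination_by A.length - a

lemma minDelGo_fst_le (A B : List Int) (a b : Nat) (hb : b ≤ B.length) :
    (minDelGo A B a b).1 ≤ B.length := by
  induction a, b using minDelGo.induct A B with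
  | case1 a b h x hc ih =>
      have hc' : b < B.length ∧ A.getD a 0 = B.getD b 0 := hc
      rw [minDelGo]
      simp only [h, ↓reduceDIte, if_pos hc']
      exact ih hc'.1
  | case2 a b h x hc ih =>
      have hc' : ¬ (b < B.length ∧ A.getD a 0 = B.getD b 0) := hc
      rw [minDelGo]
      simp only [h, ↓reduceDIte, if_neg hc']
      exact ih hb
  | case3 a b h =>
      rw [minDelGo]; simp [h, hb]

lemma minDelLoopA_eq (A B : List Int) (a b : Nat) (res : Int) (ops : List (List Int)) :
    minDelLoopA A B a b res ops =
      (res + ((minDelGo A B a b).2.length : Int), ops ++ (minDelGo A B a b).2) := by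
  induction a, b using minDelGo.induct A B generalizing res ops with
  | case1 a b h x hc ih =>
      have hc' : b < B.length ∧ A.getD a 0 = B.getD b 0 := hc
      have hble : ¬ B.length ≤ b := by omega
      rw [minDelLoopA, minDelGo]
      simp only [h, ↓reduceDIte, if_pos hc', if_neg hble, if_pos hc'.2]
      exact ih res ops
  | case2 a b h x hc ih =>
      have hc' : ¬ (b < B.length ∧ A.getD a 0 = B.getD b 0) := hc
      rw [minDelLoopA, minDelGo]
      simp only [h, ↓reduceDIte, if_neg hc']
      by_cases hble : B.length ≤ b
      · rw [if_pos hble, ih]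
        refine Prod.ext ?_ ?_
        · simp; ring
        · simp [List.append_assoc]
      · have hne : ¬ (A.getD a 0 = B.getD b 0) := fun he => hc ⟨by omega, he⟩
        rw [if_neg hble, if_neg hne, ih]
        refine Prod.ext ?_ ?_
        · simp; ring
        · simp [List.append_assoc]
  | case3 a b h =>
      rw [minDelLoopA, minDelGo]
      simp [h]

-- rebuilding: folding the emitted ops (insert at their recorded index) over the
-- current partial state A.take a ++ B.drop b yields A ++ B.drop (final b)
lemma minDelGo_rebuild (A B : List Int) (a b : Nat) (ha : a ≤ A.length) (hb : b ≤ B.length) :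
    (minDelGo A B a b).2.foldl
      (fun acc op => PySem.List.insert acc ((PySem.List.pyGet? op 0).getD 0)
                                          ((PySem.List.pyGet? op 1).getD 0))
      (A.take a ++ B.drop b)
    = A ++ B.drop (minDelGo A B a b).1 := by
  induction a, b using minDelGo.induct A B with
  | case1 a b h x hc ih =>
      have hc' : b < B.length ∧ A.getD a 0 = B.getD b 0 := hc
      rw [minDelGo]
      simp only [h, ↓reduceDIte, if_pos hc']
      have hstate : A.take a ++ B.drop b = A.take (a + 1) ++ B.drop (b + 1) := by
        have hdb : B.drop b = B.getD b 0 :: B.drop (b + 1) := by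
          rw [List.getD_eq_getElem _ _ hc'.1, ← List.getElem_cons_drop hc'.1]
        have hta : A.take (a + 1) = A.take a ++ [A.getD a 0] := by
          rw [List.getD_eq_getElem _ _ h, List.take_add_one, List.getElem?_eq_getElem h]
          rfl
        rw [hdb, hta, List.append_assoc]
        congr 1
        simp only [List.singleton_append, List.cons.injEq, and_true]
        rw [List.getD_eq_getElem _ _ h, List.getD_eq_getElem _ _ hc'.1] at hc' ⊢
        exact hc'.2.symm
      rw [hstate]
      exact ih h hc'.1
  | case2 a b h x hc ih =>
      have hc' : ¬ (b < B.length ∧ A.getD a 0 = B.getD b 0) := hc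
      rw [minDelGo]
      simp only [h, ↓reduceDIte, if_neg hc']
      simp only [List.foldl_cons]
      have hget0 : (PySem.List.pyGet? [(a : Int), A.getD a 0] 0).getD 0 = (a : Int) := by
        simp [PySem.List.pyGet?, PySem.List.pyIdx?]
      have hget1 : (PySem.List.pyGet? [(a : Int), A.getD a 0] 1).getD 0 = A.getD a 0 := by
        simp [PySem.List.pyGet?, PySem.List.pyIdx?]
      rw [hget0, hget1]
      have hlen : a ≤ (A.take a ++ B.drop b).length := by
        simp [List.length_take, List.length_drop]; omega
      have hins : PySem.List.insert (A.take a ++ B.drop b) (a : Int) (A.getD a 0)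
          = A.take (a + 1) ++ B.drop b := by
        rw [PySem.List.insert_natCast _ _ _ hlen]
        have hta : (A.take a ++ B.drop b).take a = A.take a := by
          rw [List.take_append_of_le_length (by simp [List.length_take]; omega)]
          exact List.take_take .. ▸ (by simp)
        have htd : (A.take a ++ B.drop b).drop a = B.drop b := by
          rw [List.drop_append_of_le_length (by simp [List.length_take]; omega)]
          simp
        have hta1 : A.take (a + 1) = A.take a ++ [A.getD a 0] := by
          rw [List.getD_eq_getElem _ _ h, List.take_add_one, List.getElem?_eq_getElem h]
          rfl
        rw [hta, htd, hta1, List.append_assoc]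
        rfl
      rw [hins]
      exact ih h hb
  | case3 a b h =>
      rw [minDelGo]
      have haa : a = A.length := by omega
      simp [haa]

-- ---- B-side lemmas ----

-- proof-side embedding without the accumulator
def embedGo (A : List Int) : List Int → Nat → Option (List Nat)
  | [], _ => some []
  | y :: ys, pos =>
    match indexFrom A y pos with
    | none => none
    | some p => (embedGo A ys (p + 1)).map (p :: ·)

lemma embedLoop_eq (A : List Int) (ys : List Int) (pos : Nat) (acc : List Nat) :
    embedLoop A ys pos acc = (embedGo A ys pos).map (acc ++ ·) := by
  induction ys generalizing pos acc with
  | nil => simp [embedLoop, embedGo]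
  | cons y ys ih =>
      rw [embedLoop, embedGo]
      cases hf : indexFrom A y pos with
      | none => simp
      | some p =>
          dsimp only
          rw [ih]
          cases embedGo A ys (p + 1) <;> simp

lemma indexFrom_ge (A : List Int) (y : Int) (pos p : Nat)
    (h : indexFrom A y pos = some p) : pos ≤ p := by
  induction pos using indexFrom.induct A y with
  | case1 pos hlt heq =>
      rw [indexFrom, dif_pos hlt, if_pos heq] at h
      simp only [Option.some.injEq] at h
      omega
  | case2 pos hlt heq ih =>
      rw [indexFrom, dif_pos hlt, if_neg heq] at h
      have := ih h
      omega
  | case3 pos hlt =>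
      rw [indexFrom, dif_neg hlt] at h
      exact absurd h (by simp)

lemma embedGo_ge (A : List Int) (ys : List Int) (pos : Nat) (ms : List Nat)
    (h : embedGo A ys pos = some ms) : ∀ i ∈ ms, pos ≤ i := by
  induction ys generalizing pos ms with
  | nil =>
      rw [embedGo] at h
      simp only [Option.some.injEq] at h
      subst h
      intro i hi
      simp at hi
  | cons y ys ih =>
      rw [embedGo] at h
      cases hf : indexFrom A y pos with
      | none => rw [hf] at h; simp at h
      | some p =>
          rw [hf] at h
          dsimp only at h
          cases hg : embedGo A ys (p + 1) with
          | none => rw [hg] at h; simp at h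
          | some ms' =>
              rw [hg] at h
              simp only [Option.map_some, Option.some.injEq] at h
              intro i hi
              rw [← h] at hi
              have hp := indexFrom_ge A y pos p hf
              rcases List.mem_cons.mp hi with rfl | hi'
              · exact hp
              · have := ih (p + 1) ms' hg i hi'
                omega

-- membership in buildOps' set argument is all that matters
lemma buildOps_congr (m m' : PySem.Set Nat)
    (h : ∀ i, PySem.Set.contains m i = PySem.Set.contains m' i) :
    ∀ (l : List Int) (i : Nat), buildOps m l i = buildOps m' l i := by
  intro l
  induction l with
  | nil => intro i; simp [buildOps]
  | cons x rest ih =>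
      intro i
      rw [buildOps, buildOps, h i, ih]

lemma buildOps_cons_gt (a : Nat) (ms : List Nat) :
    ∀ (l : List Int) (i : Nat), a < i → buildOps (a :: ms) l i = buildOps ms l i := by
  intro l
  induction l with
  | nil => intro i _; simp [buildOps]
  | cons x rest ih =>
      intro i hi
      have hcont : PySem.Set.contains (a :: ms) i = PySem.Set.contains ms i := by
        simp only [PySem.Set.contains_eq_listContains, List.contains_cons]
        have hne : ¬ i = a := by omega
        simp [hne]
      rw [buildOps, buildOps, hcont, ih _ (by omega)]

lemma buildOps_not_mem (ms : List Nat) (x : Int) (rest : List Int) (i : Nat)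
    (h : i ∉ ms) :
    buildOps ms (x :: rest) i = [(i : Int), x] :: buildOps ms rest (i + 1) := by
  have hcont : PySem.Set.contains ms i = false := by
    simp [PySem.Set.contains_eq_listContains, h]
  rw [buildOps, hcont]
  simp

-- the main bridge: the greedy loop of A computed from the embedding of B
lemma minDelGo_embed (A B : List Int) (a b : Nat) (hb : b ≤ B.length) :
    (∀ ms, embedGo A (B.drop b) a = some ms →
        (minDelGo A B a b).1 = B.length ∧
        (minDelGo A B a b).2 = buildOps ms (A.drop a) a) ∧
    (embedGo A (B.drop b) a = none → (minDelGo A B a b).1 < B.length) := by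
  induction a, b using minDelGo.induct A B with
  | case1 a b h x hc ih =>
      have hc' : b < B.length ∧ A.getD a 0 = B.getD b 0 := hc
      have hdB : B.drop b = B.getD b 0 :: B.drop (b + 1) := by
        rw [List.getD_eq_getElem _ _ hc'.1, ← List.getElem_cons_drop hc'.1]
      have hdA : A.drop a = A.getD a 0 :: A.drop (a + 1) := by
        rw [List.getD_eq_getElem _ _ h, ← List.getElem_cons_drop h]
      have hfind : indexFrom A (B.getD b 0) a = some a := by
        rw [indexFrom, dif_pos h, if_pos hc'.2]
      have hgo : minDelGo A B a b = minDelGo A B (a + 1) (b + 1) := by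
        rw [minDelGo]
        simp only [h, ↓reduceDIte, if_pos hc']
      have hembed : embedGo A (B.drop b) a
          = (embedGo A (B.drop (b + 1)) (a + 1)).map (a :: ·) := by
        rw [hdB, embedGo, hfind]
      obtain ⟨ihs, ihn⟩ := ih hc'.1
      constructor
      · intro ms hms
        rw [hembed] at hms
        cases hg : embedGo A (B.drop (b + 1)) (a + 1) with
        | none => rw [hg] at hms; simp at hms
        | some ms' =>
            rw [hg] at hms
            simp only [Option.map_some, Option.some.injEq] at hms
            obtain ⟨h1, h2⟩ := ihs ms' hg
            subst hms
            refine ⟨by rw [hgo]; exact h1, ?_⟩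
            rw [hgo, h2, hdA, buildOps]
            have hcont : PySem.Set.contains (a :: ms') a = true := by
              simp [PySem.Set.contains_eq_listContains]
            rw [hcont]
            exact (buildOps_cons_gt a ms' (A.drop (a + 1)) (a + 1) (by omega)).symm
      · intro hnone
        rw [hembed] at hnone
        cases hg : embedGo A (B.drop (b + 1)) (a + 1) with
        | none => rw [hgo]; exact ihn hg
        | some ms' => rw [hg] at hnone; simp at hnone
  | case2 a b h x hc ih =>
      have hc' : ¬ (b < B.length ∧ A.getD a 0 = B.getD b 0) := hc
      have hdA : A.drop a = A.getD a 0 :: A.drop (a + 1) := by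
        rw [List.getD_eq_getElem _ _ h, ← List.getElem_cons_drop h]
      have hgo : minDelGo A B a b =
          ((minDelGo A B (a + 1) b).1,
            [(a : Int), A.getD a 0] :: (minDelGo A B (a + 1) b).2) := by
        rw [minDelGo]
        simp only [h, ↓reduceDIte, if_neg hc']
      have hembed : embedGo A (B.drop b) a = embedGo A (B.drop b) (a + 1) := by
        by_cases hbl : b < B.length
        · have hne : A.getD a 0 ≠ B.getD b 0 := fun he => hc' ⟨hbl, he⟩
          have hdB : B.drop b = B.getD b 0 :: B.drop (b + 1) := by
            rw [List.getD_eq_getElem _ _ hbl, ← List.getElem_cons_drop hbl]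
          have hstep : indexFrom A (B.getD b 0) a = indexFrom A (B.getD b 0) (a + 1) := by
            rw [indexFrom, dif_pos h, if_neg hne]
          rw [hdB, embedGo, embedGo, hstep]
        · have hbe : B.drop b = [] := List.drop_eq_nil_of_le (by omega)
          rw [hbe]
          rfl
      obtain ⟨ihs, ihn⟩ := ih hb
      constructor
      · intro ms hms
        rw [hembed] at hms
        obtain ⟨h1, h2⟩ := ihs ms hms
        have hma : a ∉ ms := by
          intro hmem
          have := embedGo_ge A (B.drop b) (a + 1) ms hms a hmem
          omega
        refine ⟨by rw [hgo]; exact h1, ?_⟩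
        rw [hgo, hdA, buildOps_not_mem ms _ _ _ hma, h2]
      · intro hnone
        rw [hembed] at hnone
        rw [hgo]
        exact ihn hnone
  | case3 a b h =>
      have hgo : minDelGo A B a b = (b, []) := by
        rw [minDelGo]; simp [h]
      have hdA : A.drop a = [] := List.drop_eq_nil_of_le (by omega)
      constructor
      · intro ms hms
        by_cases hbl : b < B.length
        · exfalso
          have hdB : B.drop b = B.getD b 0 :: B.drop (b + 1) := by
            rw [List.getD_eq_getElem _ _ hbl, ← List.getElem_cons_drop hbl]
          have hfind : indexFrom A (B.getD b 0) a = none := by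
            rw [indexFrom, dif_neg h]
          rw [hdB, embedGo, hfind] at hms
          simp at hms
        · have hbe : b = B.length := by omega
          refine ⟨by rw [hgo]; exact hbe, ?_⟩
          have hbd : B.drop b = [] := List.drop_eq_nil_of_le (by omega)
          rw [hbd, embedGo] at hms
          simp only [Option.some.injEq] at hms
          rw [hgo, hdA, ← hms]
          simp [buildOps]
      · intro hnone
        by_cases hbl : b < B.length
        · rw [hgo]; exact hbl
        · exfalso
          have hbd : B.drop b = [] := List.drop_eq_nil_of_le (by omega)
          rw [hbd, embedGo] at hnone
          simp at hnone

-- ===== VERDICT (by name: the statement is the Claim_ definition above) =====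
theorem minDeletionops_spec : Claim_equal_minDeletionops := by
  intro A B _
  unfold Spec_minDeletionops minDeletionops minDeletionops_alt
  have hA := minDelLoopA_eq A B 0 0 0 []
  have hreb := minDelGo_rebuild A B 0 0 (by omega) (by omega)
  simp only [List.take_zero, List.drop_zero, List.nil_append] at hreb hA
  rw [hA]
  simp only [hreb]
  have hle := minDelGo_fst_le A B 0 0 (by omega)
  have hmain := minDelGo_embed A B 0 0 (by omega)
  simp only [List.drop_zero] at hmain
  rw [embedLoop_eq]
  cases hg : embedGo A B 0 with
  | none =>
      have hlt := hmain.2 hg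
      have hdrop : B.drop (minDelGo A B 0 0).1 ≠ [] := by
        intro hnil
        rw [List.drop_eq_nil_iff] at hnil
        omega
      have hne : A ++ B.drop (minDelGo A B 0 0).1 ≠ A := by
        intro he
        have hl := congrArg List.length he
        simp [List.length_append, List.length_drop] at hl
        omega
      simp [hne]
  | some ms =>
      obtain ⟨h1, h2⟩ := hmain.1 ms hg
      have hdrop : B.drop (minDelGo A B 0 0).1 = [] := by
        rw [h1]; simp
      have hofl : buildOps (PySem.Set.ofList ms) A 0 = buildOps ms A 0 := by
        refine buildOps_congr _ _ (fun i => ?_) A 0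
        simp only [PySem.Set.contains_eq_listContains]
        simp [PySem.Set.mem_ofList]
      simp only [hdrop, List.append_nil, ne_eq, not_true_eq_false, if_false,
        Option.map_some, List.nil_append, hofl]
      rw [h2]
      simp
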